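-- pv_equiv track=rewrite | github.com/cupy/cupy | cupy/linalg/_einsum.py | _make_transpose_axes
-- ===== SOURCE A (Python) =====
-- def _make_transpose_axes(sub, b_dims, c_dims):
--     bs = []
--     cs = []
--     ts = []
--     for axis, label in enumerate(sub):
--         if label in b_dims:
--             bs.append((label, axis))
--         elif label in c_dims:
--             cs.append((label, axis))
--         else:
--             ts.append((label, axis))
--     return (
--         _tuple_sorted_by_0(bs),
--         _tuple_sorted_by_0(cs),
--         _tuple_sorted_by_0(ts),
--     )
--
-- def _tuple_sorted_by_0(zs):
--     return tuple(i for _, i in sorted(zs))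
-- ===== SOURCE B (Python) =====
-- def _make_transpose_axes(sub, b_dims, c_dims):
--     # Different decomposition: no (label, axis) pair list and no sort of pairs.
--     # One linear pass groups the positions of each label (ascending by
--     # construction); then membership is decided once per DISTINCT label, in
--     # ascending label order, and each whole block goes to its bucket.  Correct
--     # because sorting (label, axis) pairs makes equal labels contiguous with
--     # ascending axes, exactly what per-label grouping produces.
--     groups = {}
--     for axis, label in enumerate(sub):
--         groups.setdefault(label, []).append(axis)
--     bs = []
--     cs = []
--     ts = []
--     for label in sorted(groups):
--         if label in b_dims:
--             bs += groups[label]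
--         elif label in c_dims:
--             cs += groups[label]
--         else:
--             ts += groups[label]
--     return tuple(bs), tuple(cs), tuple(ts)
-- ===== Notes on version B (the rewrite author's own statement) =====
-- stated objective: alternative
-- what changed: B never builds or sorts (label, axis) pair lists: one linear pass groups each label's positions in a dict, then bucket membership is decided once per sorted distinct label and the whole block is appended, replacing A's per-element partition followed by three separate sorts.
import Mathlib
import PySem

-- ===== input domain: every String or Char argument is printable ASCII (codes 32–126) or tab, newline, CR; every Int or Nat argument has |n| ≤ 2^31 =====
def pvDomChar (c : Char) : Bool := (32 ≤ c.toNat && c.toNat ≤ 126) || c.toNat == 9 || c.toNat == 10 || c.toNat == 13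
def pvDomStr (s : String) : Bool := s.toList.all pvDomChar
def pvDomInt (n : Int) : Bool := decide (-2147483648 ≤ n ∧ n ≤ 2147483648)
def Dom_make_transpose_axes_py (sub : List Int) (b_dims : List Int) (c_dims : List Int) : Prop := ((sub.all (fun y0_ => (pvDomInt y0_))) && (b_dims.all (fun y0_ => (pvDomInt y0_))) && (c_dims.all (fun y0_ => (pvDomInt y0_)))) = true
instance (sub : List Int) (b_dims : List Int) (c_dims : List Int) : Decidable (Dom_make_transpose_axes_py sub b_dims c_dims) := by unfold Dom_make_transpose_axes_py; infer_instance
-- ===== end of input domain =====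

-- B replaces A's partition-then-three-sorts of (label, axis) pairs by one linear pass that
-- groups positions per label in a dict, then routes each sorted distinct label's whole block
-- to its bucket (alternative decomposition, same results).

-- ===== PORT A =====
-- _tuple_sorted_by_0: sorted(zs) on (label, axis) tuples (Python tuple order = lex order), keep axes
def tuple_sorted_by_0_py (zs : List (Int × Int)) : List Int :=
  (PySem.List.sorted zs (fun z => toLex z) false).map (fun z => z.2)

def make_transpose_axes_py (sub : List Int) (b_dims : List Int) (c_dims : List Int) : List Int × List Int × List Int :=
  let r := (PySem.List.enumerate sub 0).foldl
    (fun (acc : List (Int × Int) × List (Int × Int) × List (Int × Int)) p =>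
      if p.2 ∈ b_dims then (acc.1 ++ [(p.2, p.1)], acc.2.1, acc.2.2)
      else if p.2 ∈ c_dims then (acc.1, acc.2.1 ++ [(p.2, p.1)], acc.2.2)
      else (acc.1, acc.2.1, acc.2.2 ++ [(p.2, p.1)])) ([], [], [])
  (tuple_sorted_by_0_py r.1, tuple_sorted_by_0_py r.2.1, tuple_sorted_by_0_py r.2.2)

-- ===== PORT B =====
-- grouping pass: groups = {}; for axis, label in enumerate(sub): groups.setdefault(label, []).append(axis)
def groups_of (sub : List Int) : PySem.Dict Int (List Int) :=
  (PySem.List.enumerate sub 0).foldl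
    (fun d p => d.modify p.2 [] (fun v => v ++ [p.1])) PySem.Dict.empty

def make_transpose_axes_py_alt (sub : List Int) (b_dims : List Int) (c_dims : List Int) : List Int × List Int × List Int :=
  (PySem.List.sorted (groups_of sub).keys (fun x => x) false).foldl
    (fun (acc : List Int × List Int × List Int) label =>
      if label ∈ b_dims then (acc.1 ++ (groups_of sub).getD label [], acc.2.1, acc.2.2)
      else if label ∈ c_dims then (acc.1, acc.2.1 ++ (groups_of sub).getD label [], acc.2.2)
      else (acc.1, acc.2.1, acc.2.2 ++ (groups_of sub).getD label [])) ([], [], [])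

-- ===== PRECONDITION & SPEC =====
def Spec_make_transpose_axes_py (sub : List Int) (b_dims : List Int) (c_dims : List Int) (out : List Int × List Int × List Int) : Prop := out = make_transpose_axes_py_alt sub b_dims c_dims
instance (sub : List Int) (b_dims : List Int) (c_dims : List Int) (out : List Int × List Int × List Int) : Decidable (Spec_make_transpose_axes_py sub b_dims c_dims out) := by unfold Spec_make_transpose_axes_py; infer_instance

-- ===== CLAIM (what is proved, stated in full; the proofs are below) =====
def Claim_equal_make_transpose_axes_py : Prop := ∀ (sub : List Int) (b_dims : List Int) (c_dims : List Int), Dom_make_transpose_axes_py sub b_dims c_dims → Spec_make_transpose_axes_py sub b_dims c_dims (make_transpose_axes_py sub b_dims c_dims)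

-- ===== LEMMAS AND PROOFS =====

-- the three branch predicates on labels
def predB (b_dims : List Int) (l : Int) : Bool := decide (l ∈ b_dims)
def predC (b_dims c_dims : List Int) (l : Int) : Bool := !decide (l ∈ b_dims) && decide (l ∈ c_dims)
def predT (b_dims c_dims : List Int) (l : Int) : Bool := !decide (l ∈ b_dims) && !decide (l ∈ c_dims)

-- A's loop = three filters (by the label component) of the swapped enumerate list
theorem foldA_eq (b_dims c_dims : List Int) (l : List (Int × Int)) (a b c : List (Int × Int)) :
    l.foldl (fun (acc : List (Int × Int) × List (Int × Int) × List (Int × Int)) p =>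
      if p.2 ∈ b_dims then (acc.1 ++ [(p.2, p.1)], acc.2.1, acc.2.2)
      else if p.2 ∈ c_dims then (acc.1, acc.2.1 ++ [(p.2, p.1)], acc.2.2)
      else (acc.1, acc.2.1, acc.2.2 ++ [(p.2, p.1)])) (a, b, c)
    = (a ++ (l.map (fun p => (p.2, p.1))).filter (fun z => predB b_dims z.1),
       b ++ (l.map (fun p => (p.2, p.1))).filter (fun z => predC b_dims c_dims z.1),
       c ++ (l.map (fun p => (p.2, p.1))).filter (fun z => predT b_dims c_dims z.1)) := by
  induction l generalizing a b c with
  | nil => simp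
  | cons x xs ih =>
    simp only [List.foldl_cons, List.map_cons, List.filter_cons]
    by_cases hb : x.2 ∈ b_dims <;> by_cases hc : x.2 ∈ c_dims <;>
      simp [ih, predB, predC, predT, hb, hc, List.append_assoc]

-- B's loop = per-bucket flatMap of the filtered label list (g = the group lookup)
theorem foldB_eq (b_dims c_dims : List Int) (g : Int → List Int) (ls : List Int) (a b c : List Int) :
    ls.foldl (fun (acc : List Int × List Int × List Int) label =>
      if label ∈ b_dims then (acc.1 ++ g label, acc.2.1, acc.2.2)
      else if label ∈ c_dims then (acc.1, acc.2.1 ++ g label, acc.2.2)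
      else (acc.1, acc.2.1, acc.2.2 ++ g label)) (a, b, c)
    = (a ++ (ls.filter (predB b_dims)).flatMap g,
       b ++ (ls.filter (predC b_dims c_dims)).flatMap g,
       c ++ (ls.filter (predT b_dims c_dims)).flatMap g) := by
  induction ls generalizing a b c with
  | nil => simp
  | cons x xs ih =>
    simp only [List.foldl_cons, List.filter_cons]
    by_cases hb : x ∈ b_dims <;> by_cases hc : x ∈ c_dims <;>
      simp [ih, predB, predC, predT, hb, hc, List.append_assoc]

-- the grouping dict: keys = the distinct labels, value at l = positions of l (ascending)
theorem keys_groups (sub : List Int) : (groups_of sub).keys = PySem.Set.ofList sub := by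
  unfold groups_of
  rw [PySem.Dict.keys_foldl_modify_key]
  simp [PySem.List.map_snd_enumerate, PySem.Set.ofList, PySem.Set.update]

theorem getD_groups (sub : List Int) (l : Int) :
    (groups_of sub).getD l []
      = (((PySem.List.enumerate sub 0).map (fun p => (p.2, p.1))).filter (fun z => z.1 == l)).map (fun z => z.2) := by
  unfold groups_of
  rw [show ((PySem.List.enumerate sub 0).foldl
        (fun d p => d.modify p.2 [] (fun v => v ++ [p.1])) PySem.Dict.empty)
      = (((PySem.List.enumerate sub 0).map (fun p => (p.2, p.1))).foldl
          (fun (d : PySem.Dict Int (List Int)) q => d.modify q.1 [] (fun v => v ++ [q.2])) PySem.Dict.empty) from by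
    rw [List.foldl_map]]
  rw [PySem.Dict.getD_foldl_modify_append]
  simp

-- grouping a pair list-- grouping a pair list by a nodup list of keys covering all first components is a permutation
theorem group_perm (ks : List Int) (xs : List (Int × Int)) (hnd : ks.Nodup)
    (hmem : ∀ x ∈ xs, x.1 ∈ ks) :
    (ks.flatMap (fun k => xs.filter (fun z => z.1 == k))).Perm xs := by
  induction ks generalizing xs with
  | nil =>
    have : xs = [] := by
      cases xs with
      | nil => rfl
      | cons y ys => exact absurd (hmem y (by simp)) (by simp)
    simp [this]
  | cons k ks ih =>
    have hk : k ∉ ks := (List.nodup_cons.mp hnd).1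
    have hrest : ks.flatMap (fun k' => xs.filter (fun z => z.1 == k'))
        = ks.flatMap (fun k' => (xs.filter (fun z => !(z.1 == k))).filter (fun z => z.1 == k')) := by
      refine List.flatMap_congr (fun k' hk' => ?_)
      rw [List.filter_filter]
      refine List.filter_congr (fun z _ => ?_)
      have hkk' : ¬ k' = k := fun he => hk (he ▸ hk')
      by_cases h : z.1 = k'
      · simp [h, hkk']
      · simp [h]
    have ihp := ih (xs.filter (fun z => !(z.1 == k))) (List.nodup_cons.mp hnd).2
      (fun x hx => by
        have hx' := List.mem_filter.mp hx
        have := hmem x hx'.1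
        simp at this
        rcases this with h | h
        · exact absurd h (by simpa using hx'.2)
        · exact h)
    rw [List.flatMap_cons, hrest]
    exact ((List.Perm.append_left _ ihp).trans (List.filter_append_perm _ xs))

-- pairs: sub's (label, axis) list; its axes are strictly increasing and its labels lie in sub
def pairs_of (sub : List Int) : List (Int × Int) :=
  (PySem.List.enumerate sub 0).map (fun p => (p.2, p.1))

theorem pairs_snd_lt (sub : List Int) :
    (pairs_of sub).Pairwise (fun a b => a.2 < b.2) := by
  have := PySem.List.pairwise_lt_enumerate sub (0 : Int)
  exact List.pairwise_map.mpr (this.imp (fun h => h))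

theorem mem_pairs_fst (sub : List Int) (z : Int × Int) (hz : z ∈ pairs_of sub) : z.1 ∈ sub := by
  rcases List.mem_map.mp hz with ⟨p, hp, rfl⟩
  have : p.2 ∈ (PySem.List.enumerate sub 0).map (fun q => q.2) := List.mem_map.mpr ⟨p, hp, rfl⟩
  simpa [PySem.List.map_snd_enumerate] using this

-- KEY: sorting the pair list by tuple order = concatenating per-label groups over the
-- sorted distinct labels (equal labels contiguous, axes ascending inside)
theorem sorted_pairs_eq_groups (sub : List Int) :
    PySem.List.sorted (pairs_of sub) (fun z => toLex z) false
      = (PySem.List.sorted (PySem.Set.ofList sub) (fun x => x) false).flatMap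
          (fun l => (pairs_of sub).filter (fun z => z.1 == l)) := by
  set L := PySem.List.sorted (PySem.Set.ofList sub) (fun x => x) false with hL
  have hLlt : L.Pairwise (· < ·) := PySem.List.sorted_ofList_pairwise_lt sub
  have hLnd : L.Nodup := hLlt.imp (fun h => ne_of_lt h)
  have hmemL : ∀ z ∈ pairs_of sub, z.1 ∈ L := by
    intro z hz
    have : z.1 ∈ PySem.Set.ofList sub := by
      simpa [PySem.Set.mem_ofList] using mem_pairs_fst sub z hz
    simpa [hL, PySem.List.mem_sorted] using this
  apply PySem.List.sorted_eq_of_perm_of_pairwise_lt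
  · exact group_perm L (pairs_of sub) hLnd hmemL
  · rw [List.pairwise_flatMap]
    constructor
    · intro l _
      refine ((pairs_snd_lt sub).filter _).imp_of_mem ?_
      intro a b ha hb hlt
      have ha1 : a.1 = l := by simpa using (List.mem_filter.mp ha).2
      have hb1 : b.1 = l := by simpa using (List.mem_filter.mp hb).2
      exact Prod.Lex.toLex_lt_toLex.mpr (Or.inr ⟨ha1.trans hb1.symm, hlt⟩)
    · refine hLlt.imp_of_mem ?_
      intro l1 l2 _ _ hlt x hx y hy
      have hx1 : x.1 = l1 := by simpa using (List.mem_filter.mp hx).2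
      have hy1 : y.1 = l2 := by simpa using (List.mem_filter.mp hy).2
      exact Prod.Lex.toLex_lt_toLex.mpr (Or.inl (by rw [hx1, hy1]; exact hlt))

-- one bucket: A's sort-after-partition = B's gather over sorted labels
theorem bucket_eq (sub : List Int) (p : Int → Bool) :
    tuple_sorted_by_0_py ((pairs_of sub).filter (fun z => p z.1))
      = ((PySem.List.sorted (PySem.Set.ofList sub) (fun x => x) false).filter p).flatMap
          (fun l => ((pairs_of sub).filter (fun z => z.1 == l)).map (fun z => z.2)) := by
  have hcomm : PySem.List.sorted ((pairs_of sub).filter (fun z => p z.1)) (fun z => toLex z) false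
      = (PySem.List.sorted (pairs_of sub) (fun z => toLex z) false).filter (fun z => p z.1) := by
    apply PySem.List.sorted_eq_of_perm_of_pairwise_lt
    · exact (PySem.List.sorted_perm (pairs_of sub) (fun z => toLex z) false).filter _
    · have hpw := PySem.List.sorted_pairwise (pairs_of sub) (fun z => toLex z)
      have hperm := PySem.List.sorted_perm (pairs_of sub) (fun z => toLex z) false
      have hnd : ((pairs_of sub).map Prod.snd).Nodup := by
        have : (pairs_of sub).map Prod.snd = (PySem.List.enumerate sub 0).map (fun p => p.1) := by
          simp [pairs_of, List.map_map, Function.comp]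
        rw [this, PySem.List.map_fst_enumerate]
        exact PySem.List.nodup_pyRange_one 0 (0 + sub.length)
      have hnd' : ((PySem.List.sorted (pairs_of sub) (fun z => toLex z) false).map Prod.snd).Nodup :=
        ((hperm.map Prod.snd).nodup_iff).mpr hnd
      have hne : (PySem.List.sorted (pairs_of sub) (fun z => toLex z) false).Pairwise (fun a b => a.2 ≠ b.2) :=
        List.pairwise_map.mp hnd'
      refine ((hpw.and hne).filter _).imp ?_
      rintro a b ⟨hle, hne2⟩
      refine lt_of_le_of_ne hle (fun h => hne2 ?_)
      exact congrArg Prod.snd (congrArg (fun z => ofLex z) h)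
  have hsplit : ∀ (L : List Int),
      L.flatMap (fun l => ((pairs_of sub).filter (fun z => z.1 == l)).filter (fun z => p z.1))
        = (L.filter p).flatMap (fun l => (pairs_of sub).filter (fun z => z.1 == l)) := by
    intro L
    induction L with
    | nil => simp
    | cons l L ih =>
      have hgl : ((pairs_of sub).filter (fun z => z.1 == l)).filter (fun z => p z.1)
          = if p l then (pairs_of sub).filter (fun z => z.1 == l) else [] := by
        split
        · next h =>
            refine List.filter_eq_self.mpr (fun z hz => ?_)
            have hz1 : z.1 = l := by simpa using (List.mem_filter.mp hz).2
            rw [hz1]; exact h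
        · next h =>
            refine List.filter_eq_nil_iff.mpr (fun z hz => ?_)
            have hz1 : z.1 = l := by simpa using (List.mem_filter.mp hz).2
            simp [hz1, h]
      rw [List.flatMap_cons, ih, List.filter_cons]
      by_cases hp : p l <;> simp [hgl, hp]
  unfold tuple_sorted_by_0_py
  rw [hcomm, sorted_pairs_eq_groups, List.filter_flatMap, hsplit, List.map_flatMap]

-- ===== VERDICT (by name: the statement is the Claim_ definition above) =====
theorem make_transpose_axes_py_spec : Claim_equal_make_transpose_axes_py := by
  intro sub b_dims c_dims _
  unfold Spec_make_transpose_axes_py make_transpose_axes_py make_transpose_axes_py_alt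
  simp only [foldA_eq, foldB_eq, List.nil_append, keys_groups]
  have hg : (fun l => (groups_of sub).getD l [])
      = (fun l => ((pairs_of sub).filter (fun z => z.1 == l)).map (fun z => z.2)) := by
    funext l; exact getD_groups sub l
  rw [hg]
  exact Prod.ext (bucket_eq sub _) (Prod.ext (bucket_eq sub _) (bucket_eq sub _))
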